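-- pv_equiv track=rewrite | github.com/Grand-iron/Gongbu | 프로그래머스/덧칠하기.py | solution
-- ===== SOURCE A (Python) =====
-- def solution(n, m, section):
--     answer = 0
--     x = 0
--     while x < len(section):
--         if x+1 != len(section):
--             # section[x+1]에 접근하기 전에 x+1이 section의 길이보다 작은지 확인
--             while (x+1 < len(section)) and ((section[x]+m-1) >= section[x+1]):
--                 del section[x+1]
--         x += 1
--         answer += 1
--     return answer
-- ===== SOURCE B (Python) =====
-- def solution(n, m, section):
--     # single pass: count a stroke whenever a wall lies past the covered boundary
--     answer = 0
--     end = None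
--     for s in section:
--         if end is None or s > end:
--             answer += 1
--             end = s + m - 1
--     return answer
-- ===== Notes on version B (the rewrite author's own statement) =====
-- stated objective: faster
-- what changed: Replaces the index loop with repeated in-place deletions from the list by a single pass that tracks the covered-end boundary and counts walls beyond it (A mutates section; B does not, return value is identical).
import Mathlib
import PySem

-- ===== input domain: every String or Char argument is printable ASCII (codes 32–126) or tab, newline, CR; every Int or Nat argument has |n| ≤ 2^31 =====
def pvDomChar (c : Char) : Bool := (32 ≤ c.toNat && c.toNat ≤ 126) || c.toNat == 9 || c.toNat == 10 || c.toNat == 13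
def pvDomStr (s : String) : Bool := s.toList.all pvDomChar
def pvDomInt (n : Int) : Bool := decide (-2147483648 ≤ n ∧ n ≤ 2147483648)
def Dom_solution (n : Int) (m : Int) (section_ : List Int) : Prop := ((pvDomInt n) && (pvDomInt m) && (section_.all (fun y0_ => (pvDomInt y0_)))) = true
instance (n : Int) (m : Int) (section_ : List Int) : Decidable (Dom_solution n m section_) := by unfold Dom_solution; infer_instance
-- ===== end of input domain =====

-- B replaces A's quadratic index loop with in-place deletions by a one-pass boundary-tracking
-- greedy (A mutates its `section` argument in Python; the equivalence proved here is about the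
-- RETURN value only — B does not mutate).


-- ===== PORT A =====
-- Inner while at index x: `del section[x+1]` while covered; ported as structural recursion on
-- the suffix of the list after index x (exact: deletion always happens at the front of that suffix).
def innerDel (v : Int) (m : Int) : List Int → List Int
  | [] => []
  | y :: ys => if v + m - 1 ≥ y then innerDel v m ys else y :: ys

theorem innerDel_length_le (v m : Int) (l : List Int) : (innerDel v m l).length ≤ l.length := by
  induction l with
  | nil => simp [innerDel]
  | cons y ys ih =>
    simp only [innerDel]
    split
    · exact le_trans ih (Nat.le_succ _)
    · simp

-- Outer while: x advances over the (shrinking) list; the part before x never changes, so the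
-- state is the suffix from x on, together with `answer`.
def loopA (m : Int) : List Int → Int → Int
  | [], answer => answer
  | v :: rest, answer =>
    let rest' := if rest.length ≠ 0 then innerDel v m rest else rest
    loopA m rest' (answer + 1)
termination_by l => l.length
decreasing_by
  simp only [List.length_cons]
  split
  · exact Nat.lt_succ_of_le (innerDel_length_le _ _ _)
  · exact Nat.lt_succ_of_le (Nat.le_refl _)

def solution (n : Int) (m : Int) (section_ : List Int) : Int :=
  loopA m section_ 0

-- ===== PORT B =====
def stepB (m : Int) (st : Int × Option Int) (s : Int) : Int × Option Int :=
  match st.2 with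
  | none => (st.1 + 1, some (s + m - 1))
  | some e => if s > e then (st.1 + 1, some (s + m - 1)) else st

def solution_alt (n : Int) (m : Int) (section_ : List Int) : Int :=
  (section_.foldl (stepB m) (0, none)).1

-- ===== PRECONDITION & SPEC =====
def Spec_solution (n : Int) (m : Int) (section_ : List Int) (out : Int) : Prop := out = solution_alt n m section_
instance (n : Int) (m : Int) (section_ : List Int) (out : Int) : Decidable (Spec_solution n m section_ out) := by unfold Spec_solution; infer_instance

-- ===== CLAIM (what is proved, stated in full; the proofs are below) =====
def Claim_equal_solution : Prop := ∀ (n : Int) (m : Int) (section_ : List Int), Dom_solution n m section_ → Spec_solution n m section_ (solution n m section_)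

-- ===== LEMMAS AND PROOFS =====
-- drop the leading elements covered by boundary e
def dropC (e : Int) : List Int → List Int
  | [] => []
  | y :: ys => if e ≥ y then dropC e ys else y :: ys

theorem innerDel_eq_dropC (v m : Int) (l : List Int) : innerDel v m l = dropC (v + m - 1) l := by
  induction l with
  | nil => rfl
  | cons y ys ih => simp only [innerDel, dropC, ih]

theorem loopA_cons (m v : Int) (rest : List Int) (answer : Int) :
    loopA m (v :: rest) answer = loopA m (innerDel v m rest) (answer + 1) := by
  rw [loopA.eq_def]
  cases rest with
  | nil => simp [innerDel]
  | cons y ys => simp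

theorem foldB_some (m : Int) (l : List Int) : ∀ (e acc : Int),
    (l.foldl (stepB m) (acc, some e)).1 = loopA m (dropC e l) acc := by
  induction l with
  | nil => intro e acc; simp [loopA, dropC]
  | cons y ys ih =>
    intro e acc
    by_cases h : y > e
    · have hne : ¬ e ≥ y := by omega
      simp only [List.foldl_cons, stepB, if_pos h, dropC, if_neg hne]
      rw [loopA_cons, innerDel_eq_dropC, ih]
    · have he : e ≥ y := by omega
      simp only [List.foldl_cons, stepB, if_neg h, dropC, if_pos he]
      exact ih e acc

-- ===== VERDICT (by name: the statement is the Claim_ definition above) =====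
theorem solution_spec : Claim_equal_solution := by
  intro n m section_ _
  unfold Spec_solution solution solution_alt
  cases section_ with
  | nil => rw [loopA.eq_def]; rfl
  | cons v rest =>
    rw [loopA_cons, innerDel_eq_dropC]
    simp only [List.foldl_cons, stepB]
    rw [foldB_some]
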